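-- pv_equiv track=rewrite | github.com/Infrapink/calconv | cecil.py | nyd
-- ===== SOURCE A (Python) =====
-- epoch = 1721426 - 365 # 1 January of the year 0
--
-- cycle = (33 * 365) + 8 # days in a 33-year cycle
--
-- quad = (4 * 365) + 1 # days in a normal 4-year cycle
--
-- def leap(year):
--     '''Return number of days in a year'''
--     year = int(year)
--
--     if (year % 33 == 0):
--         # normal year
--         ans = 365
--     elif ((year % 33) % 4 == 0):
--         # leap year
--         ans = 366
--     else:
--         ans = 365
--
--     return ans
--
-- def nyd(year):
--     '''Compute the Julian Day corresponding to 1 January of year'''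
--     year = int(year)
--
--     cycles = year // 33
--     y = 33 * cycles
--     ans = epoch + (cycles * cycle)
--
--     if (y + 5 <= year):
--         y += 5
--         ans = ans + quad + 365
--
--         while (y + 4 <= year):
--             y += 4
--             ans += quad
--
--     while (y < year):
--         ans += leap(y)
--         y += 1
--
--     return ans
-- ===== SOURCE B (Python) =====
-- epoch = 1721426 - 365 # 1 January of the year 0
--
-- def nyd(year):
--     '''Compute the Julian Day corresponding to 1 January of year'''
--     year = int(year)
--     c = year // 33
--     r = year - 33 * c
--     leaps = 8 * c + ((r - 1) // 4 if r > 0 else 0)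
--     return epoch + 365 * year + leaps
-- ===== Notes on version B (the rewrite author's own statement) =====
-- stated objective: simpler
-- what changed: Replaced the cycle/quad/single-year iteration with a single closed-form arithmetic expression: epoch plus the common-year length times the year plus the leap count computed directly from the floor-division quotient and remainder by the cycle length.
import Mathlib
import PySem

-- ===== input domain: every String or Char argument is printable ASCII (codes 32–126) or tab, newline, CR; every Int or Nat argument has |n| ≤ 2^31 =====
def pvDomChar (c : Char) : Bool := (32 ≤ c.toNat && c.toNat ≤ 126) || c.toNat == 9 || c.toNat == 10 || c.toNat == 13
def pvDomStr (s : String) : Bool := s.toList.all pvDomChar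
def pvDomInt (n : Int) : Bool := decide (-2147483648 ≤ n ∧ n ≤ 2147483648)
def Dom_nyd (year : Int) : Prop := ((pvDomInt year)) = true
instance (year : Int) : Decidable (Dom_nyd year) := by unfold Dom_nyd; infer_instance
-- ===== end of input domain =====

-- B replaces A's cycle/quad/year loops with one closed-form arithmetic expression (simpler).

-- ===== PORT A =====
def epoch : Int := 1721426 - 365

def cycle : Int := (33 * 365) + 8

def quad : Int := (4 * 365) + 1

def leap (year : Int) : Int :=
  if PySem.Int.mod year 33 = 0 then 365
  else if PySem.Int.mod (PySem.Int.mod year 33) 4 = 0 then 366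
  else 365

-- A's inner 'while (y + 4 <= year)' loop
def nydLoop1 (year y ans : Int) : Int × Int :=
  if y + 4 ≤ year then nydLoop1 year (y + 4) (ans + quad) else (y, ans)
termination_by (year - y).toNat
decreasing_by omega

-- A's final 'while (y < year)' loop
def nydLoop2 (year y ans : Int) : Int :=
  if y < year then nydLoop2 year (y + 1) (ans + leap y) else ans
termination_by (year - y).toNat
decreasing_by omega

def nyd (year : Int) : Int :=
  let cycles := PySem.Int.floordiv year 33
  let y := 33 * cycles
  let ans := epoch + cycles * cycle
  if y + 5 ≤ year then
    let p := nydLoop1 year (y + 5) (ans + quad + 365)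
    nydLoop2 year p.1 p.2
  else
    nydLoop2 year y ans

-- ===== PORT B =====
def nyd_alt (year : Int) : Int :=
  let c := PySem.Int.floordiv year 33
  let r := year - 33 * c
  let leaps := 8 * c + (if r > 0 then PySem.Int.floordiv (r - 1) 4 else 0)
  epoch + 365 * year + leaps

-- ===== PRECONDITION & SPEC =====
def Spec_nyd (year : Int) (out : Int) : Prop := out = nyd_alt year
instance (year : Int) (out : Int) : Decidable (Spec_nyd year out) := by unfold Spec_nyd; infer_instance

-- ===== CLAIM (what is proved, stated in full; the proofs are below) =====
def Claim_equal_nyd : Prop := ∀ (year : Int), Dom_nyd year → Spec_nyd year (nyd year)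

-- ===== LEMMAS AND PROOFS =====

-- B's value climbs by exactly leap y from year y to year y+1.
lemma alt_step (y : Int) : nyd_alt (y + 1) = nyd_alt y + leap y := by
  simp only [nyd_alt, leap, epoch]
  rw [PySem.Int.floordiv_eq_ediv_of_pos (a := y + 1) (by norm_num),
      PySem.Int.floordiv_eq_ediv_of_pos (a := y) (by norm_num),
      PySem.Int.mod_eq_emod_of_pos (a := y) (by norm_num)]
  rw [PySem.Int.mod_eq_emod_of_pos (by norm_num)]
  rw [show (y + 1) - 33 * ((y + 1) / 33) - 1 = y - 33 * ((y + 1) / 33) by ring]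
  rw [PySem.Int.floordiv_eq_ediv_of_pos (b := 4) (by norm_num)]
  by_cases h : 0 < y - 33 * (y / 33)
  · rw [PySem.Int.floordiv_eq_ediv_of_pos (b := 4) (by norm_num)]
    split_ifs <;> omega
  · split_ifs <;> omega

-- B's value climbs by exactly quad over a 4-year step inside a cycle.
lemma alt_quad (c y : Int) (h5 : 33 * c + 5 ≤ y) (hd : 4 ∣ y - 33 * c - 5)
    (hb : y + 4 ≤ 33 * c + 32) : nyd_alt (y + 4) = nyd_alt y + quad := by
  simp only [nyd_alt, quad, epoch]
  rw [PySem.Int.floordiv_eq_ediv_of_pos (a := y + 4) (by norm_num),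
      PySem.Int.floordiv_eq_ediv_of_pos (a := y) (by norm_num)]
  have h1 : (y + 4) / 33 = c := by omega
  have h2 : y / 33 = c := by omega
  rw [h1, h2]
  rw [PySem.Int.floordiv_eq_ediv_of_pos (b := 4) (by norm_num)]
  rw [PySem.Int.floordiv_eq_ediv_of_pos (b := 4) (by norm_num)]
  split_ifs <;> omega

-- B's closed form at the start of a cycle.
lemma alt_cycle_start (c : Int) : nyd_alt (33 * c) = epoch + c * cycle := by
  simp only [nyd_alt, cycle, epoch]
  rw [PySem.Int.floordiv_eq_ediv_of_pos (by norm_num)]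
  have h : (33 * c) / 33 = c := by omega
  rw [h]
  split_ifs <;> omega

-- B's closed form five years into a cycle.
lemma alt_cycle5 (c : Int) : nyd_alt (33 * c + 5) = epoch + c * cycle + quad + 365 := by
  simp only [nyd_alt, cycle, quad, epoch]
  rw [PySem.Int.floordiv_eq_ediv_of_pos (by norm_num)]
  have h : (33 * c + 5) / 33 = c := by omega
  rw [h]
  rw [PySem.Int.floordiv_eq_ediv_of_pos (by norm_num)]
  split_ifs <;> omega

-- A's final loop carries B's value from y up to year.
lemma loop2_eq : ∀ (n : Nat) (year y : Int), (year - y).toNat = n → y ≤ year →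
    nydLoop2 year y (nyd_alt y) = nyd_alt year := by
  intro n
  induction n with
  | zero =>
    intro year y hn hy
    have : y = year := by omega
    rw [nydLoop2]
    simp [this]
  | succ k ih =>
    intro year y hn hy
    have hlt : y < year := by omega
    rw [nydLoop2]
    simp only [hlt, if_pos]
    rw [← alt_step]
    exact ih year (y + 1) (by omega) (by omega)

-- A's 4-year loop stays on B's value and ends at some y' ≤ year.
lemma loop1_eq : ∀ (n : Nat) (c year y : Int), (year - y).toNat = n →
    33 * c + 5 ≤ y → 4 ∣ y - 33 * c - 5 → year ≤ 33 * c + 32 → y ≤ year →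
    ∃ y', nydLoop1 year y (nyd_alt y) = (y', nyd_alt y') ∧ y' ≤ year := by
  intro n
  induction n using Nat.strong_induction_on with
  | _ n ih =>
    intro c year y hn h5 hd hb hy
    rw [nydLoop1]
    by_cases hstep : y + 4 ≤ year
    · simp only [hstep, if_pos]
      rw [← alt_quad c y h5 hd (by omega)]
      exact ih (year - (y + 4)).toNat (by omega) c year (y + 4) rfl (by omega)
        (by obtain ⟨t, ht⟩ := hd; exact ⟨t + 1, by omega⟩) hb hstep
    · simp only [hstep, if_neg, not_false_iff]
      exact ⟨y, rfl, hy⟩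

lemma nyd_eq_alt (year : Int) : nyd year = nyd_alt year := by
  simp only [nyd]
  rw [PySem.Int.floordiv_eq_ediv_of_pos (by norm_num)]
  set c := year / 33 with hc
  have hlo : 33 * c ≤ year := by omega
  have hhi : year ≤ 33 * c + 32 := by omega
  by_cases h5 : 33 * c + 5 ≤ year
  · simp only [h5, if_pos]
    have hinit : epoch + c * cycle + quad + 365 = nyd_alt (33 * c + 5) :=
      (alt_cycle5 c).symm
    rw [hinit]
    obtain ⟨y', heq, hy'⟩ :=
      loop1_eq (year - (33 * c + 5)).toNat c year (33 * c + 5) rfl le_rfl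
        (by omega) hhi h5
    rw [heq]
    exact loop2_eq (year - y').toNat year y' rfl hy'
  · simp only [h5, if_neg, not_false_iff]
    rw [(alt_cycle_start c).symm]
    exact loop2_eq (year - 33 * c).toNat year (33 * c) rfl hlo

-- ===== VERDICT (by name: the statement is the Claim_ definition above) =====
theorem nyd_spec : Claim_equal_nyd := by
  intro year _
  unfold Spec_nyd
  exact nyd_eq_alt year
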